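-- pv_equiv track=rewrite | github.com/airturbo/taskflow | agent-team/src/agent_team_core/llm_adapter/providers.py | _iter_sse_records
-- ===== SOURCE A (Python) =====
-- from typing import Any, Iterable, Type
--
-- def _iter_sse_records(response: Any) -> Iterable[tuple[str, str]]:
--     event_name = "message"
--     data_lines: list[str] = []
--
--     for raw_line in response:
--         line = raw_line.decode("utf-8") if isinstance(raw_line, bytes) else str(raw_line)
--         line = line.rstrip("\r\n")
--         if not line:
--             if data_lines:
--                 yield event_name, "\n".join(data_lines)
--             event_name = "message"
--             data_lines = []
--             continue
--         if line.startswith(":"):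
--             continue
--         if line.startswith("event:"):
--             event_name = line.partition(":")[2].strip() or "message"
--             continue
--         if line.startswith("data:"):
--             data_lines.append(line.partition(":")[2].lstrip())
--
--     if data_lines:
--         yield event_name, "\n".join(data_lines)
-- ===== SOURCE B (Python) =====
-- from itertools import groupby
-- from typing import Any, Iterable
--
--
-- def _iter_sse_records(response: Any) -> Iterable[tuple[str, str]]:
--     def clean(raw_line):
--         line = raw_line.decode("utf-8") if isinstance(raw_line, bytes) else str(raw_line)
--         return line.rstrip("\r\n")
--
--     def parse_run(run):
--         event_name = "message"
--         data_lines: list[str] = []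
--         for line in run:
--             if line.startswith(":"):
--                 continue
--             if line.startswith("event:"):
--                 event_name = line.partition(":")[2].strip() or "message"
--             elif line.startswith("data:"):
--                 data_lines.append(line.partition(":")[2].lstrip())
--         if data_lines:
--             yield event_name, "\n".join(data_lines)
--
--     # A blank line fully resets state, so every maximal non-blank run is an
--     # independent record; parse each run on its own and skip the blank runs.
--     for is_blank, run in groupby(map(clean, response), key=lambda l: l == ""):
--         if not is_blank:
--             yield from parse_run(run)
-- ===== Notes on version B (the rewrite author's own statement) =====
-- stated objective: alternative
-- what changed: Instead of one stateful loop carrying event/data/reset state across the whole stream, B splits the cleaned lines into maximal non-blank runs with itertools.groupby and parses each run independently with a small run parser.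
import Mathlib
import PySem

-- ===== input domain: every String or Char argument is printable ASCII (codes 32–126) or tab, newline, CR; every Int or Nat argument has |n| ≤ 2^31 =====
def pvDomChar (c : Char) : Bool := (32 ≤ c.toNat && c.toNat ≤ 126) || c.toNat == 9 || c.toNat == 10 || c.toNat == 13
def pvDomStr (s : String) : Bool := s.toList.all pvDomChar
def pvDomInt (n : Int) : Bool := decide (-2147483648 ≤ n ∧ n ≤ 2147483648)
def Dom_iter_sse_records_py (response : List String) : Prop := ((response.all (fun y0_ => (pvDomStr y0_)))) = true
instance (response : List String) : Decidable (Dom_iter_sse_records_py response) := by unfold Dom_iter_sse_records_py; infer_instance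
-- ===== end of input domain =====

-- B replaces A's single stateful loop by splitting the cleaned lines into maximal
-- non-blank runs and parsing each run independently (alternative decomposition).


-- shared transliterations of the Python string idioms both programs use
-- line.rstrip("\r\n") on the char list (hand-ported, exact: drops trailing '\r'/'\n')
def pvRstripCRLF (s : List Char) : List Char :=
  (s.reverse.dropWhile (fun c => c == '\r' || c == '\n')).reverse
-- line.partition(":")[2] (exact: everything after the first ':', "" if no ':')
def pvAfterColon (s : List Char) : List Char :=
  (s.dropWhile (fun c => !(c == ':'))).drop 1

-- ===== PORT A =====
-- A's loop state: (event_name, data_lines, emitted records); `yield` appends to the third.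
def pvStepA (st : List Char × List (List Char) × List (String × String)) (raw : String) :
    List Char × List (List Char) × List (String × String) :=
  let line := pvRstripCRLF raw.toList
  if line.isEmpty then
    ("message".toList, [],
      if st.2.1.isEmpty then st.2.2
      else st.2.2 ++ [(String.ofList st.1, String.ofList (PySem.Chars.join ['\n'] st.2.1))])
  else if PySem.Chars.startswith line ":".toList then st
  else if PySem.Chars.startswith line "event:".toList then
    (let e := PySem.Chars.strip (pvAfterColon line)
     (if e.isEmpty then "message".toList else e, st.2.1, st.2.2))
  else if PySem.Chars.startswith line "data:".toList then
    (st.1, st.2.1 ++ [PySem.Chars.lstrip (pvAfterColon line)], st.2.2)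
  else st

def iter_sse_records_py (response : List String) : List (String × String) :=
  let st := response.foldl pvStepA ("message".toList, [], [])
  if st.2.1.isEmpty then st.2.2
  else st.2.2 ++ [(String.ofList st.1, String.ofList (PySem.Chars.join ['\n'] st.2.1))]

-- ===== PORT B =====
-- one step of parse_run's loop over a run's lines, state (event_name, data_lines)
def pvStepB (st : List Char × List (List Char)) (line : List Char) :
    List Char × List (List Char) :=
  if PySem.Chars.startswith line ":".toList then st
  else if PySem.Chars.startswith line "event:".toList then
    (let e := PySem.Chars.strip (pvAfterColon line)
     (if e.isEmpty then "message".toList else e, st.2))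
  else if PySem.Chars.startswith line "data:".toList then
    (st.1, st.2 ++ [PySem.Chars.lstrip (pvAfterColon line)])
  else st

def pvParseRun (run : List (List Char)) : List (String × String) :=
  let st := run.foldl pvStepB ("message".toList, [])
  if st.2.isEmpty then []
  else [(String.ofList st.1, String.ofList (PySem.Chars.join ['\n'] st.2))]

-- groupby(key = line == "") restricted to the non-blank groups: the maximal non-blank runs
def pvRuns : List (List Char) → List (List (List Char))
  | [] => []
  | l :: rest =>
    if l.isEmpty then pvRuns rest
    else (l :: rest.takeWhile (fun x => !x.isEmpty)) ::
         pvRuns (rest.dropWhile (fun x => !x.isEmpty))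
termination_by ls => ls.length
decreasing_by
  · simp
  · have := List.length_dropWhile_le (fun x : List Char => !x.isEmpty) rest
    simp at this ⊢; omega

def iter_sse_records_py_alt (response : List String) : List (String × String) :=
  (pvRuns (response.map (fun r => pvRstripCRLF r.toList))).flatMap pvParseRun

-- ===== PRECONDITION & SPEC =====
def Spec_iter_sse_records_py (response : List String) (out : List (String × String)) : Prop := out = iter_sse_records_py_alt response
instance (response : List String) (out : List (String × String)) : Decidable (Spec_iter_sse_records_py response out) := by unfold Spec_iter_sse_records_py; infer_instance

-- ===== CLAIM (what is proved, stated in full; the proofs are below) =====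
def Claim_equal_iter_sse_records_py : Prop := ∀ (response : List String), Dom_iter_sse_records_py response → Spec_iter_sse_records_py response (iter_sse_records_py response)

-- ===== LEMMAS AND PROOFS =====

-- A's step, seen on the already-cleaned line
def pvStepA' (st : List Char × List (List Char) × List (String × String)) (line : List Char) :
    List Char × List (List Char) × List (String × String) :=
  if line.isEmpty then
    ("message".toList, [],
      if st.2.1.isEmpty then st.2.2
      else st.2.2 ++ [(String.ofList st.1, String.ofList (PySem.Chars.join ['\n'] st.2.1))])
  else if PySem.Chars.startswith line ":".toList then st
  else if PySem.Chars.startswith line "event:".toList then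
    (let e := PySem.Chars.strip (pvAfterColon line)
     (if e.isEmpty then "message".toList else e, st.2.1, st.2.2))
  else if PySem.Chars.startswith line "data:".toList then
    (st.1, st.2.1 ++ [PySem.Chars.lstrip (pvAfterColon line)], st.2.2)
  else st

def pvFlush (st : List Char × List (List Char) × List (String × String)) :
    List (String × String) :=
  if st.2.1.isEmpty then st.2.2
  else st.2.2 ++ [(String.ofList st.1, String.ofList (PySem.Chars.join ['\n'] st.2.1))]

-- on a non-blank line A's step keeps the output and acts like B's run step
lemma pvStepA'_nonblank (st : List Char × List (List Char) × List (String × String))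
    (line : List Char) (h : line.isEmpty = false) :
    pvStepA' st line = (pvStepB (st.1, st.2.1) line |>.1,
                        pvStepB (st.1, st.2.1) line |>.2, st.2.2) := by
  obtain ⟨ev, dl, out⟩ := st
  simp only [pvStepA', pvStepB, h, Bool.false_eq_true, if_false]
  split_ifs <;> rfl

lemma pvFoldRun (run : List (List Char)) (hrun : ∀ l ∈ run, l.isEmpty = false)
    (ev : List Char) (dl : List (List Char)) (out : List (String × String)) :
    run.foldl pvStepA' (ev, dl, out)
      = (run.foldl pvStepB (ev, dl) |>.1, run.foldl pvStepB (ev, dl) |>.2, out) := by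
  induction run generalizing ev dl with
  | nil => rfl
  | cons l ls ih =>
    have hl := hrun l (by simp)
    simp only [List.foldl_cons, pvStepA'_nonblank _ _ hl]
    exact ih (fun x hx => hrun x (by simp [hx])) _ _

lemma pvMain (ls : List (List Char)) :
    ∀ out : List (String × String),
      pvFlush (ls.foldl pvStepA' ("message".toList, [], out))
        = out ++ (pvRuns ls).flatMap pvParseRun := by
  induction ls using pvRuns.induct with
  | case1 => intro out; simp [pvFlush, pvRuns]
  | case2 l rest hblank ih =>
    intro out
    have hstep : pvStepA' ("message".toList, [], out) l = ("message".toList, [], out) := by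
      simp [pvStepA', hblank]
    simp only [pvRuns, hblank, if_true, List.foldl_cons, hstep]
    exact ih out
  | case3 l rest hblank ih =>
    intro out
    obtain ⟨run, hrundef⟩ : ∃ run, run = l :: rest.takeWhile (fun x => !x.isEmpty) := ⟨_, rfl⟩
    obtain ⟨tail, htaildef⟩ : ∃ tail, tail = rest.dropWhile (fun x => !x.isEmpty) := ⟨_, rfl⟩
    rw [← htaildef] at ih
    have hruns : pvRuns (l :: rest) = run :: pvRuns tail := by
      rw [pvRuns, if_neg hblank, ← hrundef, ← htaildef]
    have hlsrun : l :: rest = run ++ tail := by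
      rw [hrundef, htaildef, List.cons_append, List.takeWhile_append_dropWhile]
    have hrunnb : ∀ x ∈ run, x.isEmpty = false := by
      intro x hx
      rw [hrundef] at hx
      rcases List.mem_cons.mp hx with hx | hx
      · subst hx; simpa using hblank
      · have := List.mem_takeWhile_imp hx
        simpa using this
    rw [hruns, hlsrun, List.foldl_append, pvFoldRun run hrunnb]
    cases htail : tail with
    | nil =>
      simp only [List.foldl_nil, pvFlush, pvRuns, List.flatMap_cons, List.flatMap_nil,
        List.append_nil, pvParseRun]
      split_ifs <;> simp
    | cons t ts =>
      have htb : t.isEmpty = true := by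
        have h2 := List.head?_dropWhile_not (fun x : List Char => !x.isEmpty) rest
        rw [← htaildef, htail] at h2
        simpa using h2
      have hstep1 : pvStepA' ((run.foldl pvStepB ("message".toList, [])).1,
            (run.foldl pvStepB ("message".toList, [])).2, out) t
          = ("message".toList, [], out ++ pvParseRun run) := by
        simp [pvStepA', pvParseRun, htb]
        split_ifs <;> simp
      have hstep2 : pvStepA' ("message".toList, [], out ++ pvParseRun run) t
          = ("message".toList, [], out ++ pvParseRun run) := by
        simp [pvStepA', htb]
      simp only [List.foldl_cons, hstep1]
      have hthis := ih (out ++ pvParseRun run)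
      rw [htail] at hthis
      simp only [List.foldl_cons, hstep2] at hthis
      rw [hthis]
      simp

-- ===== VERDICT (by name: the statement is the Claim_ definition above) =====
theorem iter_sse_records_py_spec : Claim_equal_iter_sse_records_py := by
  intro response _
  show iter_sse_records_py response = iter_sse_records_py_alt response
  have hstep : pvStepA = fun st (raw : String) => pvStepA' st (pvRstripCRLF raw.toList) := rfl
  show pvFlush (response.foldl pvStepA ("message".toList, [], []))
      = iter_sse_records_py_alt response
  rw [hstep, ← List.foldl_map, pvMain]
  rfl
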